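-- pv_equiv track=rewrite | github.com/ksabhinav/projectfiner | public/slbc-data/standardize_fields.py | merge_duplicate_columns
-- ===== SOURCE A (Python) =====
-- from collections import defaultdict, Counter
--
-- def merge_duplicate_columns(headers, rows):
--     """If renaming causes duplicate columns, merge them. Returns (headers, rows, merge_count)."""
--     if len(headers) == len(set(headers)):
--         return headers, rows, 0
--
--     col_indices = defaultdict(list)
--     for i, h in enumerate(headers):
--         col_indices[h].append(i)
--
--     merge_count = 0
--     unique_headers = []
--     keep_indices = []
--     merge_map = {}  # primary_idx -> [secondary indices]
--
--     seen = set()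
--     for i, h in enumerate(headers):
--         if h not in seen:
--             seen.add(h)
--             unique_headers.append(h)
--             keep_indices.append(i)
--             if len(col_indices[h]) > 1:
--                 merge_map[i] = col_indices[h][1:]
--                 merge_count += len(col_indices[h]) - 1
--
--     new_rows = []
--     for row in rows:
--         new_row = list(row) + [''] * max(0, len(headers) - len(row))
--         for primary_idx, secondary_indices in merge_map.items():
--             for sec_idx in secondary_indices:
--                 if sec_idx < len(new_row):
--                     pv = new_row[primary_idx]
--                     sv = new_row[sec_idx]
--                     if not pv or pv.strip() == '':
--                         new_row[primary_idx] = sv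
--
--         merged_row = [new_row[idx] if idx < len(new_row) else '' for idx in keep_indices]
--         new_rows.append(merged_row)
--
--     return unique_headers, new_rows, merge_count
-- ===== SOURCE B (Python) =====
-- def merge_duplicate_columns(headers, rows):
--     """If renaming causes duplicate columns, merge them. Returns (headers, rows, merge_count)."""
--     groups = {}
--     for i, h in enumerate(headers):
--         groups.setdefault(h, []).append(i)
--     if len(groups) == len(headers):
--         return headers, rows, 0
--     unique_headers = list(groups.keys())
--     merge_count = len(headers) - len(groups)
--     # per unique header: (indices to scan for a non-blank value, fallback index)
--     glist = [(g[:-1], g[-1]) for g in (groups[h] for h in unique_headers)]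
--     new_rows = []
--     for row in rows:
--         n = len(row)
--         merged = []
--         for init, last in glist:
--             for i in init:
--                 v = row[i] if i < n else ''
--                 if v and v.strip() != '':
--                     merged.append(v)
--                     break
--             else:
--                 merged.append(row[last] if last < n else '')
--         new_rows.append(merged)
--     return unique_headers, new_rows, merge_count
-- ===== Notes on version B (the rewrite author's own statement) =====
-- stated objective: simpler
-- what changed: Each merged cell is computed directly as first-non-blank-else-last over the header's index group, removing A's per-row padded copy, merge_map mutation pass and keep_indices projection.
import Mathlib
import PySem

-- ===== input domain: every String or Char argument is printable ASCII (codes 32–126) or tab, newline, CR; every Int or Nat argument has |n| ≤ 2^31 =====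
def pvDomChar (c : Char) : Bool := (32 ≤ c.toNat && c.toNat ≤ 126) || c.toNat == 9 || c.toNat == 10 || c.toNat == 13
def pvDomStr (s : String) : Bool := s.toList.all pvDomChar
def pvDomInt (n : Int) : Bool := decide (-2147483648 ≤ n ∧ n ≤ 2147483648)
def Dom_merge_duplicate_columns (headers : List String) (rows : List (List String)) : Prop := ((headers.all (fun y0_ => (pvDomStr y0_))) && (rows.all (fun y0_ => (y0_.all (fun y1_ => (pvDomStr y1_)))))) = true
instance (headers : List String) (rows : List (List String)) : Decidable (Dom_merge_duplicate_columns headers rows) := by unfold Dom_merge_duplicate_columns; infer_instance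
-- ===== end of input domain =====

-- B computes each merged column directly (first non-blank cell of the header's index group, else the
-- group's last cell), replacing A's merge_map + in-place mutation of a padded copy + keep_indices projection.

-- shared helper: the blank-cell test `not v or v.strip() == ''` (spelled identically in both Pythons)
def pvEmptyish (v : String) : Bool := (v == "") || (PySem.Str.strip v == "")

-- shared helper: the header -> list-of-column-indices grouping dict, built by the same loop in both Pythons
def pvGroupCols (headers : List String) : PySem.Dict String (List Int) :=
  (PySem.List.enumerate headers 0).foldl (fun d p => d.modify p.2 [] (· ++ [p.1])) PySem.Dict.empty

-- ===== PORT A =====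
-- body of A's scan over enumerate(headers); state = (seen, unique_headers, keep_indices, merge_map, merge_count)
def pvStepA (D : PySem.Dict String (List Int)) :
    (PySem.Set String × List String × List Int × PySem.Dict Int (List Int) × Int) → (Int × String) →
    (PySem.Set String × List String × List Int × PySem.Dict Int (List Int) × Int) := fun st p =>
  if st.1.contains p.2 then st
  else
    let g := D.getD p.2 []
    if 1 < g.length then
      (PySem.Set.add st.1 p.2, st.2.1 ++ [p.2], st.2.2.1 ++ [p.1],
       st.2.2.2.1.insert p.1 g.tail, st.2.2.2.2 + ((g.length : Int) - 1))
    else (PySem.Set.add st.1 p.2, st.2.1 ++ [p.2], st.2.2.1 ++ [p.1], st.2.2.2.1, st.2.2.2.2)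

-- body of A's `for sec_idx in secondary_indices` loop, for primary index p
def pvFStep (p : Int) : List String → Int → List String := fun nr s =>
  if s < (nr.length : Int) then
    (if pvEmptyish (PySem.List.pyGetD nr p "") then PySem.List.pySetD nr p (PySem.List.pyGetD nr s "") else nr)
  else nr

-- A's per-row work: pad, mutate through merge_map.items(), project through keep_indices
def pvMergeRow (items : List (Int × List Int)) (ki : List Int) (H : Nat) (row : List String) :
    List String :=
  -- new_row = list(row) + [''] * max(0, len(headers) - len(row)); Nat subtraction is that max
  let nr0 := row ++ List.replicate (H - row.length) ""
  let nr := items.foldl (fun nr e => e.2.foldl (pvFStep e.1) nr) nr0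
  ki.map (fun idx => if idx < (nr.length : Int) then PySem.List.pyGetD nr idx "" else "")

def merge_duplicate_columns (headers : List String) (rows : List (List String)) :
    List String × List (List String) × Int :=
  if headers.length = (PySem.Set.ofList headers).length then (headers, rows, 0)
  else
    let col_indices := pvGroupCols headers
    let st := (PySem.List.enumerate headers 0).foldl (pvStepA col_indices)
      (PySem.Set.empty, [], [], PySem.Dict.empty, 0)
    (st.2.1, rows.map (pvMergeRow st.2.2.2.1.items st.2.2.1 headers.length), st.2.2.2.2)

-- ===== PORT B =====
def pvCell (row : List String) (i : Int) : String :=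
  if i < (row.length : Int) then PySem.List.pyGetD row i "" else ""

def pvPick (row : List String) : List Int → String
  | [] => ""            -- unreachable: every group is nonempty
  | [i] => pvCell row i
  | i :: rest => if !pvEmptyish (pvCell row i) then pvCell row i else pvPick row rest

def merge_duplicate_columns_alt (headers : List String) (rows : List (List String)) :
    List String × List (List String) × Int :=
  let groups := pvGroupCols headers
  if groups.size = headers.length then (headers, rows, 0)
  else
    let uh := groups.keys
    (uh,
     rows.map (fun row => uh.map (fun h => pvPick row (groups.getD h []))),
     (headers.length : Int) - (groups.size : Int))

-- ===== PRECONDITION & SPEC =====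
def Spec_merge_duplicate_columns (headers : List String) (rows : List (List String)) (out : List String × List (List String) × Int) : Prop := out = merge_duplicate_columns_alt headers rows
instance (headers : List String) (rows : List (List String)) (out : List String × List (List String) × Int) : Decidable (Spec_merge_duplicate_columns headers rows out) := by unfold Spec_merge_duplicate_columns; infer_instance

-- ===== CLAIM (what is proved, stated in full; the proofs are below) =====
def Claim_equal_merge_duplicate_columns : Prop := ∀ (headers : List String) (rows : List (List String)), Dom_merge_duplicate_columns headers rows → Spec_merge_duplicate_columns headers rows (merge_duplicate_columns headers rows)

-- ===== LEMMAS AND PROOFS =====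
def pvIdxs (headers : List String) (h : String) : List Int :=
  ((PySem.List.enumerate headers 0).filter (fun p => p.2 == h)).map (·.1)

theorem pvGroupCols_getD (headers : List String) (h : String) :
    (pvGroupCols headers).getD h [] = pvIdxs headers h := by
  unfold pvGroupCols pvIdxs
  have hm := List.foldl_map (f := fun (p : Int × String) => (p.2, p.1))
      (g := fun (d : PySem.Dict String (List Int)) (q : String × Int) => d.modify q.1 [] (· ++ [q.2]))
      (l := PySem.List.enumerate headers 0) (init := PySem.Dict.empty)
  rw [show (PySem.List.enumerate headers 0).foldl (fun d p => d.modify p.2 [] (· ++ [p.1])) PySem.Dict.empty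
      = ((PySem.List.enumerate headers 0).map (fun p => (p.2, p.1))).foldl
          (fun d q => d.modify q.1 [] (· ++ [q.2])) PySem.Dict.empty from hm.symm]
  rw [PySem.Dict.getD_foldl_modify_append]
  simp [List.filter_map, List.map_map, Function.comp_def, PySem.Dict.getD_empty]

theorem pvGroupCols_keys (headers : List String) :
    (pvGroupCols headers).keys = PySem.Set.ofList headers := by
  unfold pvGroupCols
  have := PySem.Dict.keys_foldl_modify_key (PySem.List.enumerate headers 0)
    (fun p => p.2) [] (fun _ p xs => xs ++ [p.1]) PySem.Dict.empty
  rw [this]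
  rw [PySem.List.map_snd_enumerate, PySem.Dict.keys_empty, PySem.Set.ofList_eq_foldl]
  rfl

def pvDP : List (Int × String) → PySem.Set String → List (Int × String)
  | [], _ => []
  | p :: l, seen => if seen.contains p.2 then pvDP l seen else p :: pvDP l (PySem.Set.add seen p.2)

theorem pvDP_snd (l : List (Int × String)) : ∀ seen : PySem.Set String,
    seen ++ (pvDP l seen).map (·.2) = PySem.Set.update seen (l.map (·.2)) := by
  induction l with
  | nil => intro seen; simp [pvDP]
  | cons p l ih =>
    intro seen
    show seen ++ (pvDP (p :: l) seen).map (·.2) = PySem.Set.update (PySem.Set.add seen p.2) (l.map (·.2))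
    by_cases hm : p.2 ∈ seen
    · rw [show PySem.Set.add seen p.2 = seen from PySem.Set.add_of_mem hm]
      simp [pvDP, hm, ih]
    · simp only [pvDP, hm, decide_false, Bool.false_eq_true, ite_false, List.map_cons,
        PySem.Set.contains_eq_listContains, List.contains_eq_mem]
      rw [← ih (PySem.Set.add seen p.2)]
      rw [PySem.Set.add_of_not_mem hm]
      simp

theorem pvDP_sublist (l : List (Int × String)) : ∀ seen, List.Sublist (pvDP l seen) l := by
  induction l with
  | nil => intro _; simp [pvDP]
  | cons p l ih =>
    intro seen
    by_cases hm : p.2 ∈ seen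
    · rw [show pvDP (p :: l) seen = pvDP l seen from by simp [pvDP, hm]]
      exact (ih seen).cons p
    · rw [show pvDP (p :: l) seen = p :: pvDP l (PySem.Set.add seen p.2) from by simp [pvDP, hm]]
      exact (ih _).cons₂ p

theorem pvDP_first (l : List (Int × String)) : ∀ seen p, p ∈ pvDP l seen →
    p.2 ∉ seen ∧ (l.filter (fun q => q.2 == p.2)).head? = some p := by
  induction l with
  | nil => intro seen p hp; simp [pvDP] at hp
  | cons q l ih =>
    intro seen p hp
    by_cases hm : q.2 ∈ seen
    · rw [show pvDP (q :: l) seen = pvDP l seen from by simp [pvDP, hm]] at hp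
      obtain ⟨h1, h2⟩ := ih seen p hp
      have hne : q.2 ≠ p.2 := fun he => h1 (he ▸ hm)
      refine ⟨h1, ?_⟩
      rw [List.filter_cons_of_neg (by simp [hne])]
      exact h2
    · rw [show pvDP (q :: l) seen = q :: pvDP l (PySem.Set.add seen q.2) from by simp [pvDP, hm]] at hp
      rcases List.mem_cons.mp hp with rfl | hp
      · exact ⟨hm, by
          rw [List.filter_cons_of_pos (by simp)]; rfl⟩
      · obtain ⟨h1, h2⟩ := ih _ p hp
        have h1' : p.2 ∉ seen := fun hm => h1 (by simp [PySem.Set.mem_add, hm])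
        have hne : q.2 ≠ p.2 := fun he => h1 (by simp [PySem.Set.mem_add, he])
        refine ⟨h1', ?_⟩
        rw [List.filter_cons_of_neg (by simp [hne])]
        exact h2

theorem pvIdxs_mem (headers : List String) (h : String) (i : Int) :
    i ∈ pvIdxs headers h ↔ ∃ (k : Nat) (_ : k < headers.length), i = (k : Int) ∧ headers[k] = h := by
  unfold pvIdxs
  simp only [List.mem_map, List.mem_filter, PySem.List.mem_enumerate_iff]
  constructor
  · rintro ⟨p, ⟨⟨k, hk, rfl⟩, hb⟩, rfl⟩
    refine ⟨k, hk, by simp, ?_⟩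
    simpa using hb
  · rintro ⟨k, hk, rfl, hh⟩
    exact ⟨((k : Int), headers[k]), ⟨⟨k, hk, by simp⟩, by simpa using hh⟩, rfl⟩

theorem pvIdxs_pairwise (headers : List String) (h : String) :
    (pvIdxs headers h).Pairwise (· < ·) := by
  unfold pvIdxs
  rw [List.pairwise_map]
  exact ((PySem.List.pairwise_lt_enumerate headers 0).sublist List.filter_sublist).imp (fun hpq => hpq)

theorem pvIdxs_nodup (headers : List String) (h : String) : (pvIdxs headers h).Nodup :=
  (pvIdxs_pairwise headers h).imp (fun hlt => Int.ne_of_lt hlt)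

theorem pvLoop (D : PySem.Dict String (List Int)) (l : List (Int × String)) :
    ∀ (seen : PySem.Set String) (uh : List String) (ki : List Int)
      (mm : PySem.Dict Int (List Int)) (mc : Int),
    l.foldl (pvStepA D) (seen, uh, ki, mm, mc) =
      (PySem.Set.update seen (l.map (·.2)),
       uh ++ (pvDP l seen).map (·.2),
       ki ++ (pvDP l seen).map (·.1),
       (pvDP l seen).foldl (fun mm p =>
         if 1 < (D.getD p.2 []).length then mm.insert p.1 (D.getD p.2 []).tail else mm) mm,
       mc + ((pvDP l seen).map (fun p =>
         if 1 < (D.getD p.2 []).length then ((D.getD p.2 []).length : Int) - 1 else 0)).sum) := by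
  induction l with
  | nil => intro seen uh ki mm mc; simp [pvDP]
  | cons p l ih =>
    intro seen uh ki mm mc
    by_cases hm : p.2 ∈ seen
    · rw [show pvDP (p :: l) seen = pvDP l seen from by simp [pvDP, hm]]
      rw [List.foldl_cons, show pvStepA D (seen, uh, ki, mm, mc) p = (seen, uh, ki, mm, mc) from by
        simp [pvStepA, hm]]
      rw [ih]
      rw [show PySem.Set.update seen ((p :: l).map (·.2)) = PySem.Set.update seen (l.map (·.2)) from by
        show PySem.Set.update (PySem.Set.add seen p.2) (l.map (·.2)) = _
        rw [PySem.Set.add_of_mem hm]]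
    · rw [show pvDP (p :: l) seen = p :: pvDP l (PySem.Set.add seen p.2) from by simp [pvDP, hm]]
      rw [List.foldl_cons]
      by_cases hg : 1 < (D.getD p.2 []).length
      · rw [show pvStepA D (seen, uh, ki, mm, mc) p =
            (PySem.Set.add seen p.2, uh ++ [p.2], ki ++ [p.1],
             mm.insert p.1 (D.getD p.2 []).tail, mc + (((D.getD p.2 []).length : Int) - 1)) from by
          simp [pvStepA, hm, hg]]
        rw [ih]
        simp [hg, List.append_assoc, add_assoc]
      · rw [show pvStepA D (seen, uh, ki, mm, mc) p =
            (PySem.Set.add seen p.2, uh ++ [p.2], ki ++ [p.1], mm, mc) from by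
          simp [pvStepA, hm, hg]]
        rw [ih]
        simp [hg, List.append_assoc]

theorem pvFoldIteInsert {β : Type} (c : β → Prop) [DecidablePred c] (k : β → Int) (v : β → List Int)
    (l : List β) : ∀ d : PySem.Dict Int (List Int),
    l.foldl (fun d p => if c p then d.insert (k p) (v p) else d) d
      = (l.filter (fun p => decide (c p))).foldl (fun d p => d.insert (k p) (v p)) d := by
  induction l with
  | nil => intro d; rfl
  | cons p l ih =>
    intro d
    by_cases hc : c p
    · rw [List.foldl_cons, if_pos hc, List.filter_cons_of_pos (by simpa using hc), List.foldl_cons, ih]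
    · rw [List.foldl_cons, if_neg hc, List.filter_cons_of_neg (by simpa using hc), ih]

theorem pvSumPart (ds : List String) : ∀ L : List (Int × String), ds.Nodup → (∀ q ∈ L, q.2 ∈ ds) →
    (ds.map (fun h => (L.filter (fun q => q.2 == h)).length)).sum = L.length := by
  induction ds with
  | nil =>
    intro L _ hcov
    have : L = [] := List.eq_nil_iff_forall_not_mem.mpr (fun q hq => by simpa using hcov q hq)
    simp [this]
  | cons h t ih =>
    intro L hnd hcov
    have hht : h ∉ t := (List.nodup_cons.mp hnd).1
    have hndt : t.Nodup := (List.nodup_cons.mp hnd).2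
    have hmap : (t.map (fun h' => (L.filter (fun q => q.2 == h')).length))
        = t.map (fun h' => ((L.filter (fun q => !(q.2 == h))).filter (fun q => q.2 == h')).length) := by
      apply List.map_congr_left
      intro h' hh'
      have hne : h' ≠ h := fun he => hht (he ▸ hh')
      rw [List.filter_filter]
      congr 1
      apply List.filter_congr
      intro q _
      by_cases hq : q.2 = h'
      · simp [hq, hne]
      · simp [hq]
    have hcov2 : ∀ q ∈ L.filter (fun q => !(q.2 == h)), q.2 ∈ t := by
      intro q hq
      obtain ⟨hqL, hqb⟩ := List.mem_filter.mp hq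
      have h2 : q.2 ≠ h := by simpa using hqb
      rcases List.mem_cons.mp (hcov q hqL) with h3 | h3
      · exact absurd h3 h2
      · exact h3
    rw [List.map_cons, List.sum_cons, hmap, ih _ hndt hcov2]
    have := (List.length_eq_length_filter_add (l := L) (f := fun q => q.2 == h)).symm
    omega

theorem pvCell_eq (row : List String) (i : Int) (hi : 0 ≤ i) :
    pvCell row i = row.getD i.toNat "" := by
  unfold pvCell
  by_cases hlt : i < (row.length : Int)
  · rw [if_pos hlt, PySem.List.pyGetD_of_nonneg row "" hi]
  · rw [if_neg hlt, List.getD_eq_default]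
    omega

theorem pvPad_eq (row : List String) (k : Nat) (i : Int) (hi : 0 ≤ i) :
    PySem.List.pyGetD (row ++ List.replicate k "") i "" = row.getD i.toNat "" := by
  rw [PySem.List.pyGetD_of_nonneg _ "" hi]
  rcases Nat.lt_or_ge i.toNat row.length with hlt | hge
  · rw [List.getD_append _ _ _ _ hlt]
  · rw [List.getD_eq_default row _ hge]
    by_cases h2 : i.toNat < row.length + k
    · rw [List.getD_eq_getElem _ _ (by simp; omega), List.getElem_append_right hge]
      simp
    · rw [List.getD_eq_default]
      simp only [List.length_append, List.length_replicate]
      omega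

def pvGFun (nr0 : List String) : String → Int → String := fun pv s =>
  if s < (nr0.length : Int) then (if pvEmptyish pv then PySem.List.pyGetD nr0 s "" else pv) else pv

theorem pvInner (secs : List Int) : ∀ (nr : List String) (p : Int), 0 ≤ p → p < (nr.length : Int) →
    (∀ s ∈ secs, 0 ≤ s ∧ s ≠ p) →
    ((secs.foldl (pvFStep p) nr).length = nr.length) ∧
    (∀ q : Int, 0 ≤ q → q ≠ p →
      PySem.List.pyGetD (secs.foldl (pvFStep p) nr) q "" = PySem.List.pyGetD nr q "") ∧
    (PySem.List.pyGetD (secs.foldl (pvFStep p) nr) p ""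
      = secs.foldl (pvGFun nr) (PySem.List.pyGetD nr p "")) := by
  induction secs with
  | nil => intro nr p _ _ _; exact ⟨rfl, fun _ _ _ => rfl, rfl⟩
  | cons s rest ih =>
    intro nr p hp0 hplen hsecs
    obtain ⟨hs0, hsp⟩ := hsecs s (List.mem_cons_self)
    have hrest : ∀ x ∈ rest, 0 ≤ x ∧ x ≠ p := fun x hx => hsecs x (List.mem_cons_of_mem _ hx)
    have hpn : p = ((p.toNat : Nat) : Int) := (Int.toNat_of_nonneg hp0).symm
    have hpnat : p.toNat < nr.length := by omega
    -- facts about one step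
    have hlen1 : (pvFStep p nr s).length = nr.length := by
      unfold pvFStep
      split_ifs <;> simp [PySem.List.length_pySetD]
    have hother : ∀ q : Int, 0 ≤ q → q ≠ p →
        PySem.List.pyGetD (pvFStep p nr s) q "" = PySem.List.pyGetD nr q "" := by
      intro q hq0 hqp
      unfold pvFStep
      split_ifs with h1 h2
      · rw [hpn, show q = ((q.toNat : Nat) : Int) from (Int.toNat_of_nonneg hq0).symm,
          PySem.List.pyGetD_pySetD_natCast nr p.toNat q.toNat _ _ hpnat]
        rw [if_neg (by omega)]
      · rfl
      · rfl
    have hat : PySem.List.pyGetD (pvFStep p nr s) p ""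
        = pvGFun nr (PySem.List.pyGetD nr p "") s := by
      unfold pvFStep pvGFun
      split_ifs with h1 h2
      · rw [hpn, PySem.List.pyGetD_pySetD_natCast nr p.toNat p.toNat _ _ hpnat, if_pos rfl]
      · rfl
      · rfl
    rw [List.foldl_cons, List.foldl_cons]
    obtain ⟨ihlen, ihother, ihat⟩ := ih (pvFStep p nr s) p hp0 (by rw [hlen1] at *; exact hplen) hrest
    refine ⟨by rw [ihlen, hlen1], ?_, ?_⟩
    · intro q hq0 hqp
      rw [ihother q hq0 hqp, hother q hq0 hqp]
    · rw [ihat, hat]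
      apply PySem.List.foldl_congr_mem
      intro acc x hx
      obtain ⟨hx0, hxp⟩ := hrest x hx
      unfold pvGFun
      rw [hlen1, hother x hx0 hxp]

theorem pvMut (items : List (Int × List Int)) : ∀ nr : List String,
    (∀ e ∈ items, 0 ≤ e.1 ∧ e.1 < (nr.length : Int)) →
    (items.map (·.1)).Nodup →
    (∀ e ∈ items, ∀ s ∈ e.2, 0 ≤ s ∧ s ∉ items.map (·.1)) →
    ((items.foldl (fun nr e => e.2.foldl (pvFStep e.1) nr) nr).length = nr.length) ∧
    (∀ q : Int, 0 ≤ q → q ∉ items.map (·.1) →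
      PySem.List.pyGetD (items.foldl (fun nr e => e.2.foldl (pvFStep e.1) nr) nr) q ""
        = PySem.List.pyGetD nr q "") ∧
    (∀ e ∈ items, PySem.List.pyGetD (items.foldl (fun nr e => e.2.foldl (pvFStep e.1) nr) nr) e.1 ""
      = e.2.foldl (pvGFun nr) (PySem.List.pyGetD nr e.1 "")) := by
  induction items with
  | nil => intro nr _ _ _; exact ⟨rfl, fun _ _ _ => rfl, fun e he => absurd he (List.not_mem_nil)⟩
  | cons e rest ih =>
    intro nr hbnd hnd hdisj
    obtain ⟨he0, helen⟩ := hbnd e (List.mem_cons_self)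
    have hefst : e.1 ∈ (e :: rest).map (·.1) := by simp
    have hsecs : ∀ s ∈ e.2, 0 ≤ s ∧ s ≠ e.1 := by
      intro s hs
      obtain ⟨h1, h2⟩ := hdisj e (List.mem_cons_self) s hs
      exact ⟨h1, fun he' => h2 (he' ▸ hefst)⟩
    obtain ⟨ilen, iother, iat⟩ := pvInner e.2 nr e.1 he0 helen hsecs
    set nr1 := e.2.foldl (pvFStep e.1) nr with hnr1
    have hbnd1 : ∀ e' ∈ rest, 0 ≤ e'.1 ∧ e'.1 < (nr1.length : Int) := by
      intro e' he'
      obtain ⟨h1, h2⟩ := hbnd e' (List.mem_cons_of_mem _ he')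
      exact ⟨h1, by rw [ilen]; exact h2⟩
    have hnd1 : (rest.map (·.1)).Nodup := by simpa using hnd.of_cons
    have hdisj1 : ∀ e' ∈ rest, ∀ s ∈ e'.2, 0 ≤ s ∧ s ∉ rest.map (·.1) := by
      intro e' he' s hs
      obtain ⟨h1, h2⟩ := hdisj e' (List.mem_cons_of_mem _ he') s hs
      exact ⟨h1, fun hm => h2 (by simp [hm])⟩
    obtain ⟨rlen, rother, rat⟩ := ih nr1 hbnd1 hnd1 hdisj1
    have henotin : e.1 ∉ rest.map (·.1) := by
      simp only [List.map_cons] at hnd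
      exact (List.nodup_cons.mp hnd).1
    have hne_of_mem : ∀ e' ∈ rest, e'.1 ≠ e.1 := by
      intro e' he' heq
      exact henotin (heq ▸ List.mem_map_of_mem he')
    rw [show (e :: rest).foldl (fun nr e => e.2.foldl (pvFStep e.1) nr) nr
        = rest.foldl (fun nr e => e.2.foldl (pvFStep e.1) nr) nr1 from List.foldl_cons ..]
    refine ⟨by rw [rlen, ilen], ?_, ?_⟩
    · intro q hq0 hqnot
      have hq1 : q ≠ e.1 := fun heq => hqnot (heq ▸ hefst)
      have hq2 : q ∉ rest.map (·.1) := fun hm => hqnot (by simp [hm])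
      rw [rother q hq0 hq2, iother q hq0 hq1]
    · intro e' he'
      rcases List.mem_cons.mp he' with rfl | he'
      · rw [rother e'.1 he0 henotin, iat]
      · rw [rat e' he']
        obtain ⟨he'0, _⟩ := hbnd e' (List.mem_cons_of_mem _ he')
        rw [iother e'.1 he'0 (hne_of_mem e' he')]
        apply PySem.List.foldl_congr_mem
        intro acc x hx
        obtain ⟨hx0, hxnot⟩ := hdisj e' (List.mem_cons_of_mem _ he') x hx
        have hxe : x ≠ e.1 := fun heq => hxnot (heq ▸ hefst)
        unfold pvGFun
        rw [ilen, iother x hx0 hxe]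

theorem pvPickConst (row : List String) (t : List Int) : ∀ v : String, pvEmptyish v = false →
    t.foldl (fun pv s => if pvEmptyish pv then pvCell row s else pv) v = v := by
  induction t with
  | nil => intro v _; rfl
  | cons s rest ih =>
    intro v hv
    rw [List.foldl_cons, if_neg (by simp [hv]), ih v hv]

theorem pvPickFold (row : List String) (t : List Int) : ∀ i : Int,
    t.foldl (fun pv s => if pvEmptyish pv then pvCell row s else pv) (pvCell row i)
      = pvPick row (i :: t) := by
  induction t with
  | nil => intro i; rfl
  | cons s rest ih =>
    intro i
    rw [List.foldl_cons]
    by_cases he : pvEmptyish (pvCell row i)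
    · rw [if_pos he, ih s]
      show pvPick row (s :: rest) = pvPick row (i :: s :: rest)
      rw [show pvPick row (i :: s :: rest)
          = if !pvEmptyish (pvCell row i) then pvCell row i else pvPick row (s :: rest) from rfl]
      rw [if_neg (by simp [he])]
    · rw [if_neg he, pvPickConst row rest _ (by simpa using he)]
      show pvCell row i = pvPick row (i :: s :: rest)
      rw [show pvPick row (i :: s :: rest)
          = if !pvEmptyish (pvCell row i) then pvCell row i else pvPick row (s :: rest) from rfl]
      rw [if_pos (by simpa using he)]

theorem pvSumSub (g : (Int × String) → Nat) : ∀ l : List (Int × String),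
    (l.map (fun p => ((g p : Int)) - 1)).sum = ((l.map g).sum : Int) - l.length := by
  intro l
  induction l with
  | nil => simp
  | cons p l ih =>
    simp only [List.map_cons, List.sum_cons, ih, List.length_cons]
    push_cast
    ring

def pvDPe (headers : List String) : List (Int × String) :=
  pvDP (PySem.List.enumerate headers 0) PySem.Set.empty

theorem pvDP_bounds (headers : List String) : ∀ p ∈ pvDPe headers,
    0 ≤ p.1 ∧ p.1 < (headers.length : Int) := by
  intro p hp
  have hpe : p ∈ PySem.List.enumerate headers 0 :=
    (pvDP_sublist (PySem.List.enumerate headers 0) PySem.Set.empty).subset hp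
  obtain ⟨k, hk, rfl⟩ := (PySem.List.mem_enumerate_iff headers 0 p).mp hpe
  refine ⟨by simp, by simp; omega⟩

theorem pvDP_first' (headers : List String) : ∀ p ∈ pvDPe headers,
    ((PySem.List.enumerate headers 0).filter (fun q => q.2 == p.2)).head? = some p := by
  intro p hp
  exact (pvDP_first (PySem.List.enumerate headers 0) PySem.Set.empty p hp).2

theorem pvDP_idx_cons (headers : List String) : ∀ p ∈ pvDPe headers,
    pvIdxs headers p.2 = p.1 :: (pvIdxs headers p.2).tail := by
  intro p hp
  obtain ⟨t, ht⟩ := List.head?_eq_some_iff.mp (pvDP_first' headers p hp)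
  have h1 : pvIdxs headers p.2 = p.1 :: t.map (·.1) := by
    unfold pvIdxs; rw [ht]; rfl
  rw [h1]; rfl

theorem pvDP_fst_nodup (headers : List String) : ((pvDPe headers).map (·.1)).Nodup := by
  have hpw : ((pvDPe headers).map (·.1)).Pairwise (· < ·) := by
    rw [List.pairwise_map]
    exact (PySem.List.pairwise_lt_enumerate headers 0).sublist
      (pvDP_sublist (PySem.List.enumerate headers 0) PySem.Set.empty)
  exact hpw.imp (fun h => Int.ne_of_lt h)

theorem pvDP_snd_eq (headers : List String) :
    (pvDPe headers).map (·.2) = PySem.Set.ofList headers := by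
  have h := pvDP_snd (PySem.List.enumerate headers 0) PySem.Set.empty
  rw [PySem.List.map_snd_enumerate] at h
  have hupd : PySem.Set.update (PySem.Set.empty : PySem.Set String) headers
      = PySem.Set.ofList headers := (PySem.Set.ofList_eq_foldl headers).symm
  rw [hupd] at h
  simpa using h

theorem pvDP_disj (headers : List String) : ∀ p ∈ pvDPe headers,
    ∀ s ∈ (pvIdxs headers p.2).tail, ∀ r ∈ pvDPe headers, s ≠ r.1 := by
  intro p hp s hs r hr heq
  have h1 := pvDP_first' headers p hp
  have h2 := pvDP_first' headers r hr
  have hsidx : s ∈ pvIdxs headers p.2 := by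
    rw [pvDP_idx_cons headers p hp]
    exact List.mem_cons_of_mem _ hs
  by_cases hpr : p.2 = r.2
  · have hpe : p = r := by
      rw [hpr] at h1
      exact Option.some.inj (h1.symm.trans h2)
    subst hpe
    have hnd := pvIdxs_nodup headers p.2
    rw [pvDP_idx_cons headers p hp] at hnd
    exact (List.nodup_cons.mp hnd).1 (heq ▸ hs)
  · have hridx : r.1 ∈ pvIdxs headers r.2 := by
      rw [pvDP_idx_cons headers r hr]
      exact List.mem_cons_self
    obtain ⟨k, hk, hsk, hhk⟩ := (pvIdxs_mem headers p.2 s).mp hsidx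
    obtain ⟨k', hk', hsk', hhk'⟩ := (pvIdxs_mem headers r.2 r.1).mp hridx
    have hkk : k = k' := by
      have : (k : Int) = (k' : Int) := by rw [← hsk, heq, hsk']
      exact_mod_cast this
    subst hkk
    exact hpr (hhk ▸ hhk')

theorem pvRow (headers row : List String) :
    pvMergeRow
      (((pvDPe headers).filter
          (fun p => decide (1 < ((pvGroupCols headers).getD p.2 []).length))).map
        (fun p => (p.1, ((pvGroupCols headers).getD p.2 []).tail)))
      ((pvDPe headers).map (·.1)) headers.length row
      = ((pvDPe headers).map (·.2)).map
          (fun h => pvPick row ((pvGroupCols headers).getD h [])) := by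
  simp only [pvGroupCols_getD]
  set dp := pvDPe headers with hdp
  set items := (dp.filter (fun p => decide (1 < (pvIdxs headers p.2).length))).map
      (fun p => (p.1, (pvIdxs headers p.2).tail)) with hitems
  simp only [pvMergeRow]
  set nr0 := row ++ List.replicate (headers.length - row.length) "" with hnr0
  have hHle : (headers.length : Int) ≤ (nr0.length : Int) := by
    rw [hnr0]; simp; omega
  have hmemdp := pvDP_bounds headers
  have hcons := pvDP_idx_cons headers
  have hfnd := pvDP_fst_nodup headers
  have hdisj0 := pvDP_disj headers
  have hItemsSub : ∀ e ∈ items, ∃ p ∈ dp,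
      1 < (pvIdxs headers p.2).length ∧ e = (p.1, (pvIdxs headers p.2).tail) := by
    intro e he
    rw [hitems] at he
    obtain ⟨p, hpf, rfl⟩ := List.mem_map.mp he
    exact ⟨p, List.mem_of_mem_filter hpf, by simpa using (List.mem_filter.mp hpf).2, rfl⟩
  have hfsts : items.map (·.1)
      = (dp.filter (fun p => decide (1 < (pvIdxs headers p.2).length))).map (·.1) := by
    rw [hitems, List.map_map]; rfl
  have hbnd : ∀ e ∈ items, 0 ≤ e.1 ∧ e.1 < (nr0.length : Int) := by
    intro e he
    obtain ⟨p, hp, _, rfl⟩ := hItemsSub e he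
    obtain ⟨h1, h2⟩ := hmemdp p hp
    exact ⟨h1, lt_of_lt_of_le h2 hHle⟩
  have hnd : (items.map (·.1)).Nodup := by
    rw [hfsts]
    exact hfnd.sublist (List.Sublist.map _ List.filter_sublist)
  have hdisj : ∀ e ∈ items, ∀ s ∈ e.2, 0 ≤ s ∧ s ∉ items.map (·.1) := by
    intro e he s hs
    obtain ⟨p, hp, _, rfl⟩ := hItemsSub e he
    have hsidx : s ∈ pvIdxs headers p.2 := by
      rw [hcons p hp]; exact List.mem_cons_of_mem _ hs
    obtain ⟨k, hk, hsk, _⟩ := (pvIdxs_mem headers p.2 s).mp hsidx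
    refine ⟨by rw [hsk]; exact Int.natCast_nonneg k, ?_⟩
    intro hmem
    rw [hfsts] at hmem
    obtain ⟨r, hr, hre⟩ := List.mem_map.mp hmem
    exact hdisj0 p hp s hs r (List.mem_of_mem_filter hr) hre.symm
  obtain ⟨mlen, mother, mat⟩ := pvMut items nr0 hbnd hnd hdisj
  rw [List.map_map, List.map_map]
  apply List.map_congr_left
  intro p hp
  obtain ⟨hp0, hplt⟩ := hmemdp p hp
  show (if p.1 < ((items.foldl (fun nr e => e.2.foldl (pvFStep e.1) nr) nr0).length : Int)
      then PySem.List.pyGetD (items.foldl (fun nr e => e.2.foldl (pvFStep e.1) nr) nr0) p.1 "" else "")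
      = pvPick row (pvIdxs headers p.2)
  rw [if_pos (by rw [mlen]; exact lt_of_lt_of_le hplt hHle)]
  have hcell : ∀ s ∈ pvIdxs headers p.2,
      PySem.List.pyGetD nr0 s "" = pvCell row s ∧ 0 ≤ s ∧ s < (nr0.length : Int) := by
    intro s hsi
    obtain ⟨k, hk, rfl, _⟩ := (pvIdxs_mem headers p.2 s).mp hsi
    have h0 : (0 : Int) ≤ (k : Int) := Int.natCast_nonneg k
    refine ⟨?_, h0, lt_of_lt_of_le (by exact_mod_cast hk) hHle⟩
    rw [hnr0, pvPad_eq row _ _ h0, pvCell_eq row _ h0]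
  by_cases hc : 1 < (pvIdxs headers p.2).length
  · have hpin : (p.1, (pvIdxs headers p.2).tail) ∈ items := by
      rw [hitems]
      exact List.mem_map_of_mem (List.mem_filter.mpr ⟨hp, by simpa using hc⟩)
    rw [mat _ hpin]
    have hinit : PySem.List.pyGetD nr0 p.1 "" = pvCell row p.1 :=
      (hcell p.1 (by rw [hcons p hp]; exact List.mem_cons_self)).1
    have hfold : (pvIdxs headers p.2).tail.foldl (pvGFun nr0) (PySem.List.pyGetD nr0 p.1 "")
        = (pvIdxs headers p.2).tail.foldl
            (fun pv s => if pvEmptyish pv then pvCell row s else pv) (pvCell row p.1) := by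
      rw [hinit]
      apply PySem.List.foldl_congr_mem
      intro acc s hs
      have hsi : s ∈ pvIdxs headers p.2 := by
        rw [hcons p hp]; exact List.mem_cons_of_mem _ hs
      obtain ⟨hcs, _, hlts⟩ := hcell s hsi
      unfold pvGFun
      rw [if_pos hlts, hcs]
    rw [hfold, pvPickFold row _ p.1, ← hcons p hp]
  · have hnotin : p.1 ∉ items.map (·.1) := by
      intro hmem
      rw [hfsts] at hmem
      obtain ⟨r, hr, hre⟩ := List.mem_map.mp hmem
      have hrp : r = p :=
        List.inj_on_of_nodup_map hfnd (List.mem_of_mem_filter hr) hp hre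
      rw [hrp] at hr
      exact hc (by simpa using (List.mem_filter.mp hr).2)
    rw [mother p.1 hp0 hnotin]
    rw [(hcell p.1 (by rw [hcons p hp]; exact List.mem_cons_self)).1]
    have htail : (pvIdxs headers p.2).tail = [] := by
      have h1 := hcons p hp
      have h2 : (pvIdxs headers p.2).length = (pvIdxs headers p.2).tail.length + 1 := by
        rw [h1]; simp
      have h3 : (pvIdxs headers p.2).tail.length = 0 := by omega
      exact List.eq_nil_of_length_eq_zero h3
    rw [hcons p hp, htail]
    rfl

theorem pvSize_keys (headers : List String) :
    (pvGroupCols headers).size = (pvGroupCols headers).keys.length := by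
  simp [PySem.Dict.size, PySem.Dict.keys]

theorem pvMc (headers : List String) :
    ((pvDPe headers).map (fun p => if 1 < ((pvGroupCols headers).getD p.2 []).length
        then (((pvGroupCols headers).getD p.2 []).length : Int) - 1 else 0)).sum
      = (headers.length : Int) - ((pvGroupCols headers).size : Int) := by
  simp only [pvGroupCols_getD]
  have hterm : (pvDPe headers).map (fun p => if 1 < (pvIdxs headers p.2).length
        then ((pvIdxs headers p.2).length : Int) - 1 else 0)
      = (pvDPe headers).map (fun p => ((pvIdxs headers p.2).length : Int) - 1) := by
    apply List.map_congr_left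
    intro p hp
    by_cases hc : 1 < (pvIdxs headers p.2).length
    · rw [if_pos hc]
    · rw [if_neg hc]
      have h2 : (pvIdxs headers p.2).length = (pvIdxs headers p.2).tail.length + 1 := by
        rw [pvDP_idx_cons headers p hp]; simp
      have h1 : (pvIdxs headers p.2).length = 1 := by omega
      rw [h1]
      simp
  rw [hterm, pvSumSub (fun p => (pvIdxs headers p.2).length) (pvDPe headers)]
  have hsum : ((pvDPe headers).map (fun p => (pvIdxs headers p.2).length)).sum = headers.length := by
    have hmm : (pvDPe headers).map (fun p => (pvIdxs headers p.2).length)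
        = ((pvDPe headers).map (·.2)).map
            (fun h => ((PySem.List.enumerate headers 0).filter (fun q => q.2 == h)).length) := by
      rw [List.map_map]
      apply List.map_congr_left
      intro p _
      show (pvIdxs headers p.2).length = _
      unfold pvIdxs
      rw [List.length_map]
      rfl
    rw [hmm, pvSumPart]
    · rw [PySem.List.length_enumerate]
    · rw [pvDP_snd_eq headers]; exact PySem.Set.nodup_ofList headers
    · intro q hq
      rw [pvDP_snd_eq headers]
      obtain ⟨k, hk, rfl⟩ := (PySem.List.mem_enumerate_iff headers 0 q).mp hq
      exact (PySem.Set.mem_ofList headers headers[k]).mpr (List.getElem_mem hk)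
  rw [hsum]
  have hsz : (pvGroupCols headers).size = (pvDPe headers).length := by
    rw [pvSize_keys, pvGroupCols_keys, ← pvDP_snd_eq headers, List.length_map]
  rw [hsz]

-- ===== VERDICT (by name: the statement is the Claim_ definition above) =====
theorem merge_duplicate_columns_spec : Claim_equal_merge_duplicate_columns := by
  intro headers rows _
  show merge_duplicate_columns headers rows = merge_duplicate_columns_alt headers rows
  have hkeys := pvGroupCols_keys headers
  have hsize : (pvGroupCols headers).size = (PySem.Set.ofList headers).length := by
    rw [pvSize_keys, hkeys]
  simp only [merge_duplicate_columns, merge_duplicate_columns_alt]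
  by_cases hdup : headers.length = (PySem.Set.ofList headers).length
  · rw [if_pos hdup, if_pos (by rw [hsize, hdup])]
  · rw [if_neg hdup, if_neg (by rw [hsize]; exact fun h => hdup h.symm)]
    rw [pvLoop (pvGroupCols headers) (PySem.List.enumerate headers 0)
        PySem.Set.empty [] [] PySem.Dict.empty 0]
    rw [show pvDP (PySem.List.enumerate headers 0) PySem.Set.empty = pvDPe headers from rfl]
    dsimp only
    have hmmitems : ((pvDPe headers).foldl (fun mm p =>
        if 1 < ((pvGroupCols headers).getD p.2 []).length
        then mm.insert p.1 ((pvGroupCols headers).getD p.2 []).tail else mm) PySem.Dict.empty).items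
        = ((pvDPe headers).filter
            (fun p => decide (1 < ((pvGroupCols headers).getD p.2 []).length))).map
          (fun p => (p.1, ((pvGroupCols headers).getD p.2 []).tail)) := by
      rw [pvFoldIteInsert (fun p => 1 < ((pvGroupCols headers).getD p.2 []).length)
        (fun p => p.1) (fun p => ((pvGroupCols headers).getD p.2 []).tail) (pvDPe headers)
        PySem.Dict.empty]
      rw [PySem.Dict.items_foldl_insert_fresh _ _ _ _
        (fun a _ => by simp [PySem.Dict.contains_empty])
        (by
          have := pvDP_fst_nodup headers
          exact (this.sublist (List.Sublist.map _ List.filter_sublist)))]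
      rw [show (PySem.Dict.empty : PySem.Dict Int (List Int)).items = [] from rfl, List.nil_append]
    refine Prod.ext ?_ (Prod.ext ?_ ?_)
    · show [] ++ (pvDPe headers).map (·.2) = (pvGroupCols headers).keys
      rw [List.nil_append, pvDP_snd_eq headers, hkeys]
    · show rows.map (pvMergeRow _ ([] ++ (pvDPe headers).map (·.1)) headers.length)
        = rows.map _
      apply List.map_congr_left
      intro row _
      rw [List.nil_append]
      calc pvMergeRow _ ((pvDPe headers).map (·.1)) headers.length row
          = ((pvDPe headers).map (·.2)).map
              (fun h => pvPick row ((pvGroupCols headers).getD h [])) := by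
            rw [← pvRow headers row, hmmitems]
        _ = (pvGroupCols headers).keys.map
              (fun h => pvPick row ((pvGroupCols headers).getD h [])) := by
            rw [pvDP_snd_eq headers, hkeys]
    · show 0 + ((pvDPe headers).map (fun p => if 1 < ((pvGroupCols headers).getD p.2 []).length
          then (((pvGroupCols headers).getD p.2 []).length : Int) - 1 else 0)).sum
        = (headers.length : Int) - ((pvGroupCols headers).size : Int)
      rw [zero_add, pvMc headers]
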